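-- pv_equiv track=rewrite | github.com/PDI-Berlin/pdi-nomad-plugin | src/pdi_nomad_plugin/utils.py | rename_block_cols
-- ===== SOURCE A (Python) =====
-- def split_list_by_element(lst, element):
--     """
--     Split a list by an element
--     """
--     indices = [i for i, x in enumerate(lst) if element in x]
--     start = 0
--     result = []
--     for index in indices:
--         result.append(lst[start:index])
--         start = index
--     result.append(lst[start:])
--     return result
--
-- def rename_block_cols(string, block_cols, initial_col):
--     """
--     Rename columns by splitting on '.' and appending the index of the block column
--     """
--
--     split_list = split_list_by_element(string, initial_col)
--
--     new_columns = []
--     for index, chunk in enumerate(split_list):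
--         bubbler = [f'{i}.{index}' for i in chunk if i in block_cols]
--         other_cols = [i for i in chunk if i not in block_cols]
--         if bubbler:
--             new_columns.extend(bubbler)
--             bubbler = []
--         if other_cols:
--             new_columns.extend(other_cols)
--             other_cols = []
--     return new_columns
-- ===== SOURCE B (Python) =====
-- def rename_block_cols(string, block_cols, initial_col):
--     """
--     Single fused pass: keep a running block index and two buffers
--     (renamed block columns, other columns); flush them on each block boundary.
--     """
--     new_columns = []
--     idx = 0
--     bubbler = []
--     other_cols = []
--     for x in string:
--         if initial_col in x:
--             new_columns += bubbler
--             new_columns += other_cols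
--             bubbler = []
--             other_cols = []
--             idx += 1
--         if x in block_cols:
--             bubbler.append(f'{x}.{idx}')
--         else:
--             other_cols.append(x)
--     new_columns += bubbler
--     new_columns += other_cols
--     return new_columns
-- ===== Notes on version B (the rewrite author's own statement) =====
-- stated objective: simpler
-- what changed: B fuses A's two phases (split the list into chunks with split_list_by_element via enumerate/slices, then re-scan each chunk twice with comprehensions) into one single pass that keeps a running block index and two buffers, flushed at each block boundary; split_list_by_element disappears, removing the intermediate chunk lists and repeated re-scans.
import Mathlib
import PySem

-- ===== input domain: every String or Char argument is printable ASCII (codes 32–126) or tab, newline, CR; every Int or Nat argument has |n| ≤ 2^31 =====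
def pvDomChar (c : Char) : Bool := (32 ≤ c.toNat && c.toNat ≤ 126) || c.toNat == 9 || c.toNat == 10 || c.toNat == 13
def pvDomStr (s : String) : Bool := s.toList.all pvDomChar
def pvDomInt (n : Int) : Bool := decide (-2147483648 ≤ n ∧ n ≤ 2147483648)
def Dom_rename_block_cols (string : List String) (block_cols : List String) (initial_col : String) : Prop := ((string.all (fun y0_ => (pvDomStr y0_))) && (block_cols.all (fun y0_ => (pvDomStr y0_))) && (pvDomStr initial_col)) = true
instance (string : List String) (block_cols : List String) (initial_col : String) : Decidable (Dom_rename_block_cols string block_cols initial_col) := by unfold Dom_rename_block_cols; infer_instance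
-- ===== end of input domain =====

-- B fuses A's split-then-enumerate two-phase algorithm into one pass with two buffers (objective: simpler; return value only — neither mutates its arguments).

-- ===== PORT A =====
-- helper of A: split a list on elements containing `element` as a substring
def split_list_by_element (lst : List String) (element : String) : List (List String) :=
  let indices : List Int :=
    (PySem.List.enumerate lst 0).filterMap
      (fun ix => if PySem.Str.isIn element ix.2 then some ix.1 else none)
  let st : Int × List (List String) :=
    indices.foldl
      (fun st index =>
        (index, st.2 ++ [PySem.List.slice lst (some st.1) (some index)]))
      (0, [])
  st.2 ++ [PySem.List.slice lst (some st.1) none]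

def rename_block_cols (string : List String) (block_cols : List String) (initial_col : String) : List String :=
  let split_list := split_list_by_element string initial_col
  (PySem.List.enumerate split_list 0).foldl
    (fun new_columns ic =>
      let index := ic.1
      let chunk := ic.2
      -- f'{i}.{index}' with a nonnegative Python int index: PySem.Int.toStr is exact
      let bubbler := (chunk.filter (fun i => block_cols.contains i)).map
        (fun i => i ++ "." ++ PySem.Int.toStr index)
      let other_cols := chunk.filter (fun i => !block_cols.contains i)
      let nc := if bubbler.isEmpty then new_columns else new_columns ++ bubbler
      if other_cols.isEmpty then nc else nc ++ other_cols)
    []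

-- ===== PORT B =====
-- B's loop body; state: (idx, bubbler, other_cols, new_columns)
def stepB (block_cols : List String) (initial_col : String)
    (st : Int × List String × List String × List String) (x : String) :
    Int × List String × List String × List String :=
  let st := if PySem.Str.isIn initial_col x
    then (st.1 + 1, ([] : List String), ([] : List String), st.2.2.2 ++ st.2.1 ++ st.2.2.1)
    else st
  if block_cols.contains x
  then (st.1, st.2.1 ++ [x ++ "." ++ PySem.Int.toStr st.1], st.2.2.1, st.2.2.2)
  else (st.1, st.2.1, st.2.2.1 ++ [x], st.2.2.2)

def rename_block_cols_alt (string : List String) (block_cols : List String) (initial_col : String) : List String :=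
  let st := string.foldl (stepB block_cols initial_col) (0, [], [], [])
  st.2.2.2 ++ st.2.1 ++ st.2.2.1

-- ===== PRECONDITION & SPEC =====
def Spec_rename_block_cols (string : List String) (block_cols : List String) (initial_col : String) (out : List String) : Prop := out = rename_block_cols_alt string block_cols initial_col
instance (string : List String) (block_cols : List String) (initial_col : String) (out : List String) : Decidable (Spec_rename_block_cols string block_cols initial_col out) := by unfold Spec_rename_block_cols; infer_instance

-- ===== CLAIM (what is proved, stated in full; the proofs are below) =====
def Claim_equal_rename_block_cols : Prop := ∀ (string : List String) (block_cols : List String) (initial_col : String), Dom_rename_block_cols string block_cols initial_col → Spec_rename_block_cols string block_cols initial_col (rename_block_cols string block_cols initial_col)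

-- ===== LEMMAS AND PROOFS =====

-- match indices of A's comprehension, computed in Nat
def natIdxs (el : String) (s : Nat) : List String → List Nat
  | [] => []
  | x :: t => (if PySem.Str.isIn el x then [s] else []) ++ natIdxs el (s + 1) t

-- the chunks A's slice loop produces from the index list
def chunksFromNat (lst : List String) (s : Nat) : List Nat → List (List String)
  | [] => []
  | i :: is => (lst.drop s).take (i - s) :: chunksFromNat lst i is

-- recursive characterisation of A's split: (first chunk, remaining chunks)
def splitRec (el : String) : List String → List String × List (List String)
  | [] => ([], [])
  | x :: t =>
    let r := splitRec el t
    if PySem.Str.isIn el x then ([], (x :: r.1) :: r.2) else (x :: r.1, r.2)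

def consHead (x : String) : List (List String) → List (List String)
  | [] => []
  | c :: cs => (x :: c) :: cs

def rn (idx : Int) (ys : List String) : List String :=
  ys.map (fun i => i ++ "." ++ PySem.Int.toStr idx)

def chunkOut (bc : List String) (idx : Int) (c : List String) : List String :=
  rn idx (c.filter (fun i => bc.contains i)) ++ c.filter (fun i => !bc.contains i)

def flatOut (bc : List String) (idx : Int) : List (List String) → List String
  | [] => []
  | c :: cs => chunkOut bc idx c ++ flatOut bc (idx + 1) cs

-- the generic single-pass recursion B follows
def G (bc : List String) (el : String) (idx : Int) (bub oth : List String) : List String → List String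
  | [] => bub ++ oth
  | x :: t =>
    if PySem.Str.isIn el x then
      (bub ++ oth) ++
        (if bc.contains x then G bc el (idx + 1) [x ++ "." ++ PySem.Int.toStr (idx + 1)] [] t
         else G bc el (idx + 1) [] [x] t)
    else
      (if bc.contains x then G bc el idx (bub ++ [x ++ "." ++ PySem.Int.toStr idx]) oth t
       else G bc el idx bub (oth ++ [x]) t)

theorem natIdxs_shift (el : String) (t : List String) : ∀ s : Nat, natIdxs el (s + 1) t = (natIdxs el s t).map (· + 1) := by
  induction t with
  | nil => intro s; simp [natIdxs]
  | cons x t ih => intro s; simp [natIdxs, ih (s + 1)]; split <;> simp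

theorem enumerate_filterMap_eq_natIdxs (el : String) (lst : List String) : ∀ s : Nat,
    (PySem.List.enumerate lst (s : Int)).filterMap
      (fun ix => if PySem.Str.isIn el ix.2 then some ix.1 else none)
    = (natIdxs el s lst).map (Nat.cast : Nat → Int) := by
  induction lst with
  | nil => intro s; simp [PySem.List.enumerate_nil, natIdxs]
  | cons x t ih => 
    intro s
    rw [PySem.List.enumerate_cons]
    have : ((s : Int) + 1) = ((s + 1 : Nat) : Int) := by push_cast; ring
    simp only [List.filterMap_cons, natIdxs, this, ih (s + 1)]
    by_cases h : PySem.Chars.isIn el.toList x.toList <;> simp [h]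

theorem chunksFromNat_shift (x : String) (t : List String) : ∀ (is : List Nat) (s : Nat),
    chunksFromNat (x :: t) (s + 1) (is.map (· + 1)) = chunksFromNat t s is := by
  intro is
  induction is with
  | nil => intro s; simp [chunksFromNat]
  | cons i is ih => intro s; simp [chunksFromNat, ih i, Nat.succ_sub_succ]

theorem getLastD_map_succ (is : List Nat) : ∀ s : Nat, (is.map (· + 1)).getLastD (s + 1) = is.getLastD s + 1 := by
  induction is with
  | nil => intro s; simp
  | cons i is ih => intro s; simp only [List.map_cons, List.getLastD_cons, ih i]

theorem foldl_slices (lst : List String) (is : List Nat) : ∀ (s : Nat) (r : List (List String)),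
    (is.map (Nat.cast : Nat → Int)).foldl
      (fun (st : Int × List (List String)) index =>
        (index, st.2 ++ [PySem.List.slice lst (some st.1) (some index)]))
      ((s : Int), r)
    = (((is.getLastD s : Nat) : Int), r ++ chunksFromNat lst s is) := by
  induction is with
  | nil => intro s r; simp [chunksFromNat]
  | cons i is ih =>
    intro s r
    rw [List.map_cons, List.foldl_cons, ih i, List.getLastD_cons, PySem.List.slice_natCast]
    simp [chunksFromNat]

-- guard removal: extending by an empty list is a no-op, so A's truthiness guards vanish
theorem append_guard (acc l : List String) : (if l.isEmpty then acc else acc ++ l) = acc ++ l := by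
  cases l <;> simp

-- closed form of A's split helper
theorem split_closed (el : String) (lst : List String) :
    split_list_by_element lst el
    = chunksFromNat lst 0 (natIdxs el 0 lst) ++ [lst.drop ((natIdxs el 0 lst).getLastD 0)] := by
  unfold split_list_by_element
  dsimp only
  have h0 : (0 : Int) = ((0 : Nat) : Int) := by norm_num
  rw [h0, enumerate_filterMap_eq_natIdxs, foldl_slices]
  simp [PySem.List.slice_from_natCast]

-- shifting the whole tail decomposition under a cons
theorem tailEq (el x : String) (t : List String) :
    chunksFromNat (x :: t) 0 ((natIdxs el 0 t).map (· + 1))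
      ++ [(x :: t).drop (((natIdxs el 0 t).map (· + 1)).getLastD 0)]
    = consHead x (chunksFromNat t 0 (natIdxs el 0 t) ++ [t.drop ((natIdxs el 0 t).getLastD 0)]) := by
  cases h : natIdxs el 0 t with
  | nil => simp [chunksFromNat, consHead]
  | cons i is =>
    simp only [List.map_cons, chunksFromNat, List.getLastD_cons, chunksFromNat_shift x t is i,
      getLastD_map_succ is i, consHead, List.cons_append]
    simp [List.take_succ_cons, List.drop_succ_cons]

-- A's split equals the recursive characterisation
theorem split_eq (el : String) (lst : List String) :
    split_list_by_element lst el = (splitRec el lst).1 :: (splitRec el lst).2 := by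
  rw [split_closed]
  induction lst with
  | nil => simp [natIdxs, chunksFromNat, splitRec]
  | cons x t ih =>
    have hsh : natIdxs el (0 + 1) t = (natIdxs el 0 t).map (· + 1) := natIdxs_shift el t 0
    have htail := tailEq el x t
    rw [ih] at htail
    by_cases h : PySem.Str.isIn el x
    · simp only [natIdxs, h, if_pos, List.singleton_append, hsh, splitRec]
      rw [show chunksFromNat (x :: t) 0 (0 :: (natIdxs el 0 t).map (· + 1))
            = [] :: chunksFromNat (x :: t) 0 ((natIdxs el 0 t).map (· + 1)) from by
            simp [chunksFromNat]]
      rw [List.getLastD_cons, List.cons_append, htail]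
      simp [consHead]
    · simp only [natIdxs, h, if_neg, Bool.false_eq_true, not_false_iff, List.nil_append, hsh,
        splitRec]
      rw [htail]
      simp [consHead]

-- closure of Int-index fold of A's rename over enumerate
theorem foldA (bc : List String) : ∀ (chunks : List (List String)) (k : Int) (acc : List String),
    (PySem.List.enumerate chunks k).foldl
      (fun new_columns ic =>
        let index := ic.1
        let chunk := ic.2
        let bubbler := (chunk.filter (fun i => bc.contains i)).map
          (fun i => i ++ "." ++ PySem.Int.toStr index)
        let other_cols := chunk.filter (fun i => !bc.contains i)
        let nc := if bubbler.isEmpty then new_columns else new_columns ++ bubbler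
        if other_cols.isEmpty then nc else nc ++ other_cols)
      acc = acc ++ flatOut bc k chunks := by
  intro chunks
  induction chunks with
  | nil => intro k acc; simp [PySem.List.enumerate_nil, flatOut]
  | cons c cs ih =>
    intro k acc
    rw [PySem.List.enumerate_cons, List.foldl_cons, ih]
    simp only [append_guard, flatOut, chunkOut, rn]
    simp [List.append_assoc]

-- closure of B's fold: final assembly equals out ++ G
theorem foldB (bc : List String) (el : String) : ∀ (lst : List String) (idx : Int) (bub oth out : List String),
    (lst.foldl (stepB bc el) (idx, bub, oth, out)).2.2.2
      ++ (lst.foldl (stepB bc el) (idx, bub, oth, out)).2.1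
      ++ (lst.foldl (stepB bc el) (idx, bub, oth, out)).2.2.1
    = out ++ G bc el idx bub oth lst := by
  intro lst
  induction lst with
  | nil => intro idx bub oth out; simp [G]
  | cons x t ih =>
    intro idx bub oth out
    rw [List.foldl_cons]
    by_cases h : PySem.Chars.isIn el.toList x.toList <;> by_cases hm : x ∈ bc <;>
      [ rw [show stepB bc el (idx, bub, oth, out) x
              = (idx + 1, [x ++ "." ++ PySem.Int.toStr (idx + 1)], [], out ++ bub ++ oth) from by
              simp [stepB, h, hm]];
        rw [show stepB bc el (idx, bub, oth, out) x
              = (idx + 1, [], [x], out ++ bub ++ oth) from by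
              simp [stepB, h, hm]];
        rw [show stepB bc el (idx, bub, oth, out) x
              = (idx, bub ++ [x ++ "." ++ PySem.Int.toStr idx], oth, out) from by
              simp [stepB, h, hm]];
        rw [show stepB bc el (idx, bub, oth, out) x
              = (idx, bub, oth ++ [x], out) from by
              simp [stepB, h, hm]] ] <;>
      rw [ih] <;> simp [G, h, hm, List.append_assoc]

-- bridge: the single-pass recursion computes A's chunked output
theorem G_eq_flat (bc : List String) (el : String) : ∀ (lst : List String) (idx : Int) (c : List String),
    G bc el idx (rn idx (c.filter (fun i => bc.contains i))) (c.filter (fun i => !bc.contains i)) lst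
    = chunkOut bc idx (c ++ (splitRec el lst).1) ++ flatOut bc (idx + 1) (splitRec el lst).2 := by
  intro lst
  induction lst with
  | nil => intro idx c; simp [G, splitRec, chunkOut, flatOut]
  | cons x t ih =>
    intro idx c
    by_cases h : PySem.Chars.isIn el.toList x.toList
    · -- block boundary: flush, bump the index, classify x into the fresh buffers
      have h1 := ih (idx + 1) [x]
      simp only [G, PySem.Str.isIn_eq, h, if_true]
      by_cases hm : x ∈ bc <;>
        simp [rn, hm] at h1 ⊢ <;> rw [h1] <;>
        simp [splitRec, h, chunkOut, flatOut, rn, List.append_assoc, add_assoc]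
    · -- same chunk: x joins the accumulated chunk c
      have h1 := ih idx (c ++ [x])
      simp only [G, PySem.Str.isIn_eq, h, if_false, Bool.false_eq_true]
      by_cases hm : x ∈ bc <;>
        simp [rn, hm, List.filter_append] at h1 ⊢ <;> rw [h1] <;>
        simp [splitRec, h, chunkOut, rn, List.append_assoc]

-- ===== VERDICT (by name: the statement is the Claim_ definition above) =====
theorem rename_block_cols_spec : Claim_equal_rename_block_cols := by
  intro string block_cols initial_col _
  unfold Spec_rename_block_cols rename_block_cols rename_block_cols_alt
  dsimp only
  rw [split_eq, foldA, foldB]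
  have hG := G_eq_flat block_cols initial_col string 0 []
  simp only [List.filter_nil, rn, List.map_nil] at hG
  rw [hG]
  simp [flatOut, chunkOut]
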